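-- pv_equiv track=rewrite | github.com/SunTiecheng/3DGS-filtering | Denoise/pseudo_color_projection.py | extract_field_names
-- ===== SOURCE A (Python) =====
-- def extract_field_names(header):
--     """Try to extract field names from the header."""
--     field_names = []
--
--     # Handle PLY format
--     if "ply" in header:
--         properties = []
--         for line in header.split('\n'):
--             if line.strip().startswith("property"):
--                 parts = line.strip().split()
--                 if len(parts) >= 3:
--                     properties.append(parts[-1])
--         if properties:
--             return properties
--
--     # Handle other common formats
--     for line in header.split('\n'):
--         line = line.strip()
--         if line.startswith('#'):
--             line = line[1:].strip()
--         elif line.startswith('//'):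
--             line = line[2:].strip()
--         elif line.startswith(';'):
--             line = line[1:].strip()
--
--         keywords = ['FIELDS', 'COLUMNS', 'fields', 'columns']
--         found = False
--         for keyword in keywords:
--             if keyword in line:
--                 parts = line.split(keyword, 1)[1].strip().split()
--                 if parts:
--                     field_names = parts
--                     found = True
--                     break
--
--         if found:
--             break
--
--         if not field_names and len(line.split()) >= 3:
--             potential_fields = line.split()
--             if any(x in potential_fields[0].lower() for x in ['x', '0']):
--                 if any(y in potential_fields[1].lower() for y in ['y', '1']):
--                     if any(z in potential_fields[2].lower() for z in ['z', '2']):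
--                         field_names = potential_fields
--
--     return field_names
-- ===== SOURCE B (Python) =====
-- def _clean(line):
--     line = line.strip()
--     for pre in ('#', '//', ';'):
--         if line.startswith(pre):
--             return line[len(pre):].strip()
--     return line
--
--
-- def _kw_parts(line):
--     for keyword in ('FIELDS', 'COLUMNS', 'fields', 'columns'):
--         if keyword in line:
--             parts = line.split(keyword, 1)[1].strip().split()
--             if parts:
--                 return parts
--     return None
--
--
-- def _xyz(toks):
--     return (('x' in toks[0].lower() or '0' in toks[0].lower())
--             and ('y' in toks[1].lower() or '1' in toks[1].lower())
--             and ('z' in toks[2].lower() or '2' in toks[2].lower()))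
--
--
-- def extract_field_names(header):
--     """Try to extract field names from the header."""
--     lines = header.split('\n')
--
--     if "ply" in header:
--         props = [ln.strip().split()[-1] for ln in lines
--                  if ln.strip().startswith("property") and len(ln.strip().split()) >= 3]
--         if props:
--             return props
--
--     # Pass 1: a keyword line always wins, regardless of position.
--     for ln in lines:
--         parts = _kw_parts(_clean(ln))
--         if parts is not None:
--             return parts
--
--     # Pass 2: first line looking like an x/y/z data or header row.
--     for ln in lines:
--         toks = _clean(ln).split()
--         if len(toks) >= 3 and _xyz(toks):
--             return toks
--
--     return []
-- ===== Notes on version B (the rewrite author's own statement) =====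
-- stated objective: simpler
-- what changed: Replaces A's single stateful loop (which stores a heuristic x/y/z match in field_names but lets a later keyword match overwrite it and break) by two independent early-return passes - a keyword pass that always wins, then an x/y/z heuristic pass - and replaces the PLY accumulator loop by a filter+map comprehension.
import Mathlib
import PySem

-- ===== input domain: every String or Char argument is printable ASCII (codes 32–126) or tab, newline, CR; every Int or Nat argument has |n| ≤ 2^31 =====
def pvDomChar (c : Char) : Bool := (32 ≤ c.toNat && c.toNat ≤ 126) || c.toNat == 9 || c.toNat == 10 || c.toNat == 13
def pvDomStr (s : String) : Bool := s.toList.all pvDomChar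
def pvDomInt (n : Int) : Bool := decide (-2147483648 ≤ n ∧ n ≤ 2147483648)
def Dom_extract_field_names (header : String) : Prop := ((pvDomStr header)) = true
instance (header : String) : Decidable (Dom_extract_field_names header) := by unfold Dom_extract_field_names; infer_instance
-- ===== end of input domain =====

-- B replaces A's single stateful loop (heuristic match stored but overwritable by a later
-- keyword match) by two independent passes — keyword pass first, x/y/z heuristic pass second —
-- and the PLY accumulator loop by a filter+map; objective: simpler.

-- ===== PORT A =====

-- A: strip the line, then the '#'/'//'/';' elif chain (A does this inline at the top of its loop body)
def pvCleanA (ln : String) : String :=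
  let line := PySem.Str.strip ln
  if PySem.Str.startswith line "#" then PySem.Str.strip (PySem.Str.slice line (some 1) none)
  else if PySem.Str.startswith line "//" then PySem.Str.strip (PySem.Str.slice line (some 2) none)
  else if PySem.Str.startswith line ";" then PySem.Str.strip (PySem.Str.slice line (some 1) none)
  else line

-- A's inner `for keyword in keywords` loop: first keyword present in the line whose
-- split-after tokens are non-empty ([1] after split(kw,1) always exists since kw is in line,
-- so the .getD defaults are unreachable)
def pvKwLoopA : List String → String → Option (List String)
  | [], _ => none
  | kw :: ks, line =>
    if PySem.Str.isIn kw line then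
      let parts := PySem.Str.split₀ (PySem.Str.strip (((PySem.Str.splitMax? line kw 1).getD []).getD 1 ""))
      if parts ≠ [] then some parts else pvKwLoopA ks line
    else pvKwLoopA ks line

-- A's PLY loop, accumulating parts[-1] of each 'property' line (parts[-1] exists since len ≥ 3)
def pvPlyLoopA : List String → List String → List String
  | [], props => props
  | ln :: rest, props =>
    let s := PySem.Str.strip ln
    if PySem.Str.startswith s "property" then
      let parts := PySem.Str.split₀ s
      if 3 ≤ parts.length then pvPlyLoopA rest (props ++ [(PySem.List.pyGet? parts (-1)).getD ""])
      else pvPlyLoopA rest props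
    else pvPlyLoopA rest props

-- A's main loop over lines, carrying field_names; a keyword hit breaks (returns), the
-- x/y/z heuristic only fires while field_names is still empty
set_option maxHeartbeats 1000000 in
def pvMainLoopA : List String → List String → List String
  | [], fn => fn
  | ln :: rest, fn =>
    let line := pvCleanA ln
    match pvKwLoopA ["FIELDS", "COLUMNS", "fields", "columns"] line with
    | some parts => parts
    | none =>
      if fn = [] ∧ 3 ≤ (PySem.Str.split₀ line).length then
        let pf := PySem.Str.split₀ line
        if PySem.Str.isIn "x" (PySem.Str.lower (pf.getD 0 "")) || PySem.Str.isIn "0" (PySem.Str.lower (pf.getD 0 "")) then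
          if PySem.Str.isIn "y" (PySem.Str.lower (pf.getD 1 "")) || PySem.Str.isIn "1" (PySem.Str.lower (pf.getD 1 "")) then
            if PySem.Str.isIn "z" (PySem.Str.lower (pf.getD 2 "")) || PySem.Str.isIn "2" (PySem.Str.lower (pf.getD 2 "")) then
              pvMainLoopA rest pf
            else pvMainLoopA rest fn
          else pvMainLoopA rest fn
        else pvMainLoopA rest fn
      else pvMainLoopA rest fn

def extract_field_names (header : String) : List String :=
  let lines := (PySem.Str.split? header "\n").getD []
  if PySem.Str.isIn "ply" header then
    let properties := pvPlyLoopA lines []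
    if properties ≠ [] then properties else pvMainLoopA lines []
  else pvMainLoopA lines []

-- ===== PORT B =====

-- B._clean: strip, then the first matching prefix of ('#','//',';') is cut and re-stripped
def pvCleanAlt (ln : String) : String :=
  let line := PySem.Str.strip ln
  match ["#", "//", ";"].find? (fun p => PySem.Str.startswith line p) with
  | some p => PySem.Str.strip (PySem.Str.slice line (some (PySem.Str.len p)) none)
  | none => line

-- B._kw_parts: loop over the keyword tuple
def pvKwPartsAlt : List String → String → Option (List String)
  | [], _ => none
  | kw :: ks, line =>
    if PySem.Str.isIn kw line then
      let parts := PySem.Str.split₀ (PySem.Str.strip (((PySem.Str.splitMax? line kw 1).getD []).getD 1 ""))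
      if parts ≠ [] then some parts else pvKwPartsAlt ks line
    else pvKwPartsAlt ks line

-- B._xyz
def pvXyzAlt (toks : List String) : Bool :=
  (PySem.Str.isIn "x" (PySem.Str.lower (toks.getD 0 "")) || PySem.Str.isIn "0" (PySem.Str.lower (toks.getD 0 ""))) &&
  (PySem.Str.isIn "y" (PySem.Str.lower (toks.getD 1 "")) || PySem.Str.isIn "1" (PySem.Str.lower (toks.getD 1 ""))) &&
  (PySem.Str.isIn "z" (PySem.Str.lower (toks.getD 2 "")) || PySem.Str.isIn "2" (PySem.Str.lower (toks.getD 2 "")))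

-- B's PLY comprehension
def pvPlyPropsAlt (lines : List String) : List String :=
  (lines.filter (fun ln =>
      PySem.Str.startswith (PySem.Str.strip ln) "property" &&
      decide (3 ≤ (PySem.Str.split₀ (PySem.Str.strip ln)).length))).map
    (fun ln => (PySem.List.pyGet? (PySem.Str.split₀ (PySem.Str.strip ln)) (-1)).getD "")

-- B's two passes (B returns early out of the PLY branch, so the passes are a helper)
def pvPassesAlt (lines : List String) : List String :=
  match lines.findSome? (fun ln => pvKwPartsAlt ["FIELDS", "COLUMNS", "fields", "columns"] (pvCleanAlt ln)) with
  | some parts => parts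
  | none =>
    match lines.find? (fun ln =>
        decide (3 ≤ (PySem.Str.split₀ (pvCleanAlt ln)).length) && pvXyzAlt (PySem.Str.split₀ (pvCleanAlt ln))) with
    | some ln => PySem.Str.split₀ (pvCleanAlt ln)
    | none => []

def extract_field_names_alt (header : String) : List String :=
  let lines := (PySem.Str.split? header "\n").getD []
  if PySem.Str.isIn "ply" header then
    let props := pvPlyPropsAlt lines
    if props ≠ [] then props else pvPassesAlt lines
  else pvPassesAlt lines

-- ===== PRECONDITION & SPEC =====
def Spec_extract_field_names (header : String) (out : List String) : Prop := out = extract_field_names_alt header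
instance (header : String) (out : List String) : Decidable (Spec_extract_field_names header out) := by unfold Spec_extract_field_names; infer_instance

-- ===== CLAIM (what is proved, stated in full; the proofs are below) =====
def Claim_equal_extract_field_names : Prop := ∀ (header : String), Dom_extract_field_names header → Spec_extract_field_names header (extract_field_names header)

-- ===== LEMMAS AND PROOFS =====

lemma pvClean_eq (ln : String) : pvCleanA ln = pvCleanAlt ln := by
  have l1 : PySem.Str.len "#" = 1 := by decide
  have l2 : PySem.Str.len "//" = 2 := by decide
  have l3 : PySem.Str.len ";" = 1 := by decide
  simp only [pvCleanA, pvCleanAlt]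
  by_cases h1 : PySem.Str.startswith (PySem.Str.strip ln) "#" = true
  · rw [if_pos h1, List.find?_cons_of_pos h1]
    simp only [l1]
  · rw [if_neg h1, List.find?_cons_of_neg h1]
    by_cases h2 : PySem.Str.startswith (PySem.Str.strip ln) "//" = true
    · rw [if_pos h2, List.find?_cons_of_pos h2]
      simp only [l2]
    · rw [if_neg h2, List.find?_cons_of_neg h2]
      by_cases h3 : PySem.Str.startswith (PySem.Str.strip ln) ";" = true
      · rw [if_pos h3, List.find?_cons_of_pos h3]
        simp only [l3]
      · rw [if_neg h3, List.find?_cons_of_neg h3, List.find?_nil]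

lemma pvKw_eq (ks : List String) (line : String) :
    pvKwLoopA ks line = pvKwPartsAlt ks line := by
  induction ks with
  | nil => rfl
  | cons kw ks ih => simp only [pvKwLoopA, pvKwPartsAlt, ih]

lemma pvPlyPropsAlt_cons (ln : String) (rest : List String) :
    pvPlyPropsAlt (ln :: rest) =
      (if (PySem.Str.startswith (PySem.Str.strip ln) "property" &&
            decide (3 ≤ (PySem.Str.split₀ (PySem.Str.strip ln)).length)) then
        [(PySem.List.pyGet? (PySem.Str.split₀ (PySem.Str.strip ln)) (-1)).getD ""] else [])
      ++ pvPlyPropsAlt rest := by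
  unfold pvPlyPropsAlt
  rw [List.filter_cons]
  cases h : (PySem.Str.startswith (PySem.Str.strip ln) "property" &&
      decide (3 ≤ (PySem.Str.split₀ (PySem.Str.strip ln)).length)) <;> simp

lemma pvPly_eq (lines : List String) : ∀ props,
    pvPlyLoopA lines props = props ++ pvPlyPropsAlt lines := by
  induction lines with
  | nil => intro props; simp [pvPlyLoopA, pvPlyPropsAlt]
  | cons ln rest ih =>
    intro props
    rw [pvPlyPropsAlt_cons]
    by_cases h1 : PySem.Str.startswith (PySem.Str.strip ln) "property" = true
    · by_cases h2 : 3 ≤ (PySem.Str.split₀ (PySem.Str.strip ln)).length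
      · simp only [pvPlyLoopA, h1, h2, if_pos, decide_true, Bool.and_self, ih]
        simp
      · simp only [pvPlyLoopA, h1, h2, if_true, decide_false, Bool.and_false, ih]
        simp
    · have hb : PySem.Str.startswith (PySem.Str.strip ln) "property" = false := by
        simpa using h1
      simp only [pvPlyLoopA, hb, Bool.false_eq_true, if_false, Bool.false_and, ih]
      simp

-- the heuristic predicate of B's second pass
def pvHeurP (ln : String) : Bool :=
  decide (3 ≤ (PySem.Str.split₀ (pvCleanAlt ln)).length) && pvXyzAlt (PySem.Str.split₀ (pvCleanAlt ln))

def pvHeurFind (lines : List String) : List String :=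
  match lines.find? pvHeurP with
  | some ln => PySem.Str.split₀ (pvCleanAlt ln)
  | none => []

lemma pvPassesAlt_eq (lines : List String) :
    pvPassesAlt lines =
      match lines.findSome? (fun ln => pvKwPartsAlt ["FIELDS", "COLUMNS", "fields", "columns"] (pvCleanAlt ln)) with
      | some parts => parts
      | none => pvHeurFind lines := rfl

lemma pvHeurFind_cons (ln : String) (rest : List String) :
    pvHeurFind (ln :: rest) =
      if pvHeurP ln then PySem.Str.split₀ (pvCleanAlt ln) else pvHeurFind rest := by
  unfold pvHeurFind
  rw [List.find?_cons]
  cases h : pvHeurP ln <;> simp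

-- A's nested heuristic ifs, folded into one condition
lemma pvIfNest {α β : Type} (f : β → α) (c1 : Prop) [Decidable c1] (x y z : Bool) (pf fn : β) :
    (if c1 then (if x then (if y then (if z then f pf else f fn) else f fn) else f fn) else f fn)
      = f (if c1 ∧ (x && y && z) = true then pf else fn) := by
  by_cases h1 : c1 <;> cases x <;> cases y <;> cases z <;> simp [h1]

lemma pvHeurP_ne_nil {ln : String} (h : pvHeurP ln = true) :
    PySem.Str.split₀ (pvCleanAlt ln) ≠ [] := by
  intro hnil
  have := h
  simp only [pvHeurP, hnil] at this
  simp at this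

set_option maxHeartbeats 1000000 in
lemma pvMainLoopA_char (lines : List String) : ∀ fn,
    pvMainLoopA lines fn =
      match lines.findSome? (fun ln => pvKwPartsAlt ["FIELDS", "COLUMNS", "fields", "columns"] (pvCleanAlt ln)) with
      | some parts => parts
      | none => if fn = [] then pvHeurFind lines else fn := by
  induction lines with
  | nil => intro fn; cases fn <;> rfl
  | cons ln rest ih =>
    intro fn
    rw [List.findSome?_cons]
    cases hkw : pvKwPartsAlt ["FIELDS", "COLUMNS", "fields", "columns"] (pvCleanAlt ln) with
    | some parts => simp only [pvMainLoopA, pvKw_eq, pvClean_eq, hkw]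
    | none =>
      simp only [pvMainLoopA, pvKw_eq, pvClean_eq, hkw]
      rw [pvIfNest (pvMainLoopA rest)]
      rw [ih]
      have hcond :
          ((fn = [] ∧ 3 ≤ (PySem.Str.split₀ (pvCleanAlt ln)).length) ∧
            (pvXyzAlt (PySem.Str.split₀ (pvCleanAlt ln))) = true)
          ↔ (fn = [] ∧ pvHeurP ln = true) := by
        simp only [pvHeurP, Bool.and_eq_true, decide_eq_true_eq]
        constructor
        · rintro ⟨⟨ha, hb⟩, hc⟩; exact ⟨ha, hb, hc⟩
        · rintro ⟨ha, hb, hc⟩; exact ⟨⟨ha, hb⟩, hc⟩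
      have hfold : ∀ toks : List String,
          ((PySem.Str.isIn "x" (PySem.Str.lower (toks.getD 0 "")) ||
              PySem.Str.isIn "0" (PySem.Str.lower (toks.getD 0 ""))) &&
            (PySem.Str.isIn "y" (PySem.Str.lower (toks.getD 1 "")) ||
              PySem.Str.isIn "1" (PySem.Str.lower (toks.getD 1 ""))) &&
            (PySem.Str.isIn "z" (PySem.Str.lower (toks.getD 2 "")) ||
              PySem.Str.isIn "2" (PySem.Str.lower (toks.getD 2 "")))) = pvXyzAlt toks :=
        fun _ => rfl
      simp only [hfold]
      cases hfs : List.findSome?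
          (fun ln => pvKwPartsAlt ["FIELDS", "COLUMNS", "fields", "columns"] (pvCleanAlt ln)) rest with
      | some p => simp
      | none =>
        simp only []
        rw [pvHeurFind_cons]
        by_cases hp : pvHeurP ln = true
        · by_cases hfn : fn = []
          · have hpf : PySem.Str.split₀ (pvCleanAlt ln) ≠ [] := pvHeurP_ne_nil hp
            rw [if_pos (hcond.mpr ⟨hfn, hp⟩)]
            simp [hfn, hp, hpf]
          · rw [if_neg (fun h => hfn (hcond.mp h).1)]
            simp [hfn]
        · rw [if_neg (fun h => hp (hcond.mp h).2)]
          have hp' : pvHeurP ln = false := by simpa using hp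
          simp [hp']

lemma pvMain_eq_passes (lines : List String) :
    pvMainLoopA lines [] = pvPassesAlt lines := by
  rw [pvMainLoopA_char, pvPassesAlt_eq]
  simp

-- ===== VERDICT (by name: the statement is the Claim_ definition above) =====
theorem extract_field_names_spec : Claim_equal_extract_field_names := by
  intro header _
  unfold Spec_extract_field_names extract_field_names extract_field_names_alt
  simp only [pvPly_eq, List.nil_append, pvMain_eq_passes]
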